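-- pv_equiv track=rewrite | github.com/skyidufoix/Project-Data-Logger | dataLoggerParsing_v2_1.py | session_to_dict
-- ===== SOURCE A (Python) =====
-- LOG_CATEGORY = {
--     "DATALOG_CAT_SW_VERSION": 1,  # 16bytes
--     "DATALOG_CAT_POWER_NETWORK_STATUS": 100,  # 1600bytes
--     "DATALOG_CAT_A2B_COMM": 100,
--     "DATALOG_CAT_OTHER_COMM": 30,  # 480bytes
--     "DATALOG_CAT_ADC_TEMP": 30,
--     "DATALOG_CAT_POWER_IC": 80,
--     "DATALOG_CAT_DTC": 80,
--     "DATALOG_CAT_OTA": 100,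
--     "DATALOG_CAT_IFC": 100,
--     "DATALOG_CAT_CAN_RX": 750,
--     "DATALOG_CAT_CAN_TX": 675,
--     "DATALOG_CAT_CRC": 2,
-- }
--
-- def session_to_dict(session):
--     d_session = {}
--     start_index = 0
--
--     for category, length in LOG_CATEGORY.items():
--         end_index = start_index + length * 16
--         d_session[category] = session[start_index:end_index]
--         start_index = end_index
--
--     return d_session
-- ===== SOURCE B (Python) =====
-- LOG_CATEGORY = {
--     "DATALOG_CAT_SW_VERSION": 1,  # 16bytes
--     "DATALOG_CAT_POWER_NETWORK_STATUS": 100,  # 1600bytes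
--     "DATALOG_CAT_A2B_COMM": 100,
--     "DATALOG_CAT_OTHER_COMM": 30,  # 480bytes
--     "DATALOG_CAT_ADC_TEMP": 30,
--     "DATALOG_CAT_POWER_IC": 80,
--     "DATALOG_CAT_DTC": 80,
--     "DATALOG_CAT_OTA": 100,
--     "DATALOG_CAT_IFC": 100,
--     "DATALOG_CAT_CAN_RX": 750,
--     "DATALOG_CAT_CAN_TX": 675,
--     "DATALOG_CAT_CRC": 2,
-- }
--
--
-- def session_to_dict(session):
--     # boundary table: cumulative byte offsets 0, 16, 1616, ...
--     bounds = [0]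
--     for length in LOG_CATEGORY.values():
--         bounds.append(bounds[-1] + length * 16)
--     return {name: session[lo:hi]
--             for name, lo, hi in zip(LOG_CATEGORY, bounds, bounds[1:])}
-- ===== Notes on version B (the rewrite author's own statement) =====
-- stated objective: alternative
-- what changed: B precomputes a cumulative boundary table of byte offsets and then builds the dict with a comprehension zipping names with adjacent boundary pairs, instead of threading a mutable start_index and a growing dict through one loop.
import Mathlib
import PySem

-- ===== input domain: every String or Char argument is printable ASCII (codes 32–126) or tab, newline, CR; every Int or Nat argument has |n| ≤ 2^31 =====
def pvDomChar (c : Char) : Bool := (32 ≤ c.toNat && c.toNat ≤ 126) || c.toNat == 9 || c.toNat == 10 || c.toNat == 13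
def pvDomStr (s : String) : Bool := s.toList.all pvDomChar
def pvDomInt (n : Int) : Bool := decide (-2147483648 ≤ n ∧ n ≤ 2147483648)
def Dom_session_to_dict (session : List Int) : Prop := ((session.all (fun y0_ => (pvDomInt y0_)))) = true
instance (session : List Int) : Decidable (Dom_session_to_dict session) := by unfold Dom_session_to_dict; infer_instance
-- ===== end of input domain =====

-- B splits the session by first building a cumulative boundary table and then mapping slices over
-- adjacent boundary pairs, instead of A's single loop threading a mutable start_index and a dict.

-- ===== PORT A =====
-- module constant LOG_CATEGORY (insertion order preserved)
def LOG_CATEGORY : List (String × Int) := [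
  ("DATALOG_CAT_SW_VERSION", 1),
  ("DATALOG_CAT_POWER_NETWORK_STATUS", 100),
  ("DATALOG_CAT_A2B_COMM", 100),
  ("DATALOG_CAT_OTHER_COMM", 30),
  ("DATALOG_CAT_ADC_TEMP", 30),
  ("DATALOG_CAT_POWER_IC", 80),
  ("DATALOG_CAT_DTC", 80),
  ("DATALOG_CAT_OTA", 100),
  ("DATALOG_CAT_IFC", 100),
  ("DATALOG_CAT_CAN_RX", 750),
  ("DATALOG_CAT_CAN_TX", 675),
  ("DATALOG_CAT_CRC", 2)]

-- loop over LOG_CATEGORY.items() threading (d_session, start_index)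
def session_to_dict (session : List Int) : List (String × List Int) :=
  (LOG_CATEGORY.foldl
    (fun (st : PySem.Dict String (List Int) × Int) cl =>
      let end_index := st.2 + cl.2 * 16
      (st.1.insert cl.1 (PySem.List.slice session (some st.2) (some end_index)), end_index))
    (PySem.Dict.empty, 0)).1.items

-- ===== PORT B =====
-- boundary table: bounds = [0]; for length in values: bounds.append(bounds[-1] + length*16)
def pvBounds : List Int :=
  LOG_CATEGORY.foldl (fun bounds cl => bounds ++ [bounds.getLast! + cl.2 * 16]) [0]

-- {name: session[lo:hi] for name, lo, hi in zip(LOG_CATEGORY, bounds, bounds[1:])}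
def session_to_dict_alt (session : List Int) : List (String × List Int) :=
  ((LOG_CATEGORY.map (·.1)).zip (pvBounds.zip pvBounds.tail)).map
    (fun nlh => (nlh.1, PySem.List.slice session (some nlh.2.1) (some nlh.2.2)))

-- ===== PRECONDITION & SPEC =====
def Spec_session_to_dict (session : List Int) (out : List (String × List Int)) : Prop := out = session_to_dict_alt session
instance (session : List Int) (out : List (String × List Int)) : Decidable (Spec_session_to_dict session out) := by unfold Spec_session_to_dict; infer_instance

-- ===== CLAIM (what is proved, stated in full; the proofs are below) =====
def Claim_equal_session_to_dict : Prop := ∀ (session : List Int), Dom_session_to_dict session → Spec_session_to_dict session (session_to_dict session)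

-- ===== LEMMAS AND PROOFS =====

-- ===== VERDICT (by name: the statement is the Claim_ definition above) =====
theorem session_to_dict_spec : Claim_equal_session_to_dict := by
  intro session _
  show session_to_dict session = session_to_dict_alt session
  simp [session_to_dict, session_to_dict_alt, LOG_CATEGORY, pvBounds, PySem.Dict.insert, PySem.Dict.empty, List.getLast!]
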